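-- pv_equiv track=rewrite | github.com/kashivns/cs515_project_files | filter_snipets.py | remove_one_line_entries
-- ===== SOURCE A (Python) =====
-- def remove_one_line_entries(lines):
--     curr_count =0
--     final_lines = []
--     new_lines = []
--     for line in lines:
--         if line == "---------------------------------\n":
--             if curr_count == 1:
--                 pass
--             else:
--                 new_lines.append(line)
--                 final_lines.extend(new_lines)
--             new_lines = []
--             curr_count = 0
--         else:
--             new_lines.append(line)
--             curr_count += 1
--     return final_lines
-- ===== SOURCE B (Python) =====
-- DELIM = "---------------------------------\n"
--
-- def remove_one_line_entries(lines):
--     # Pass 1: split into delimiter-terminated records (trailing partial discarded).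
--     records = []
--     curr = []
--     for line in lines:
--         curr.append(line)
--         if line == DELIM:
--             records.append(curr)
--             curr = []
--     # Pass 2: drop records of length 2 (one content line + delimiter), flatten.
--     return [l for rec in records if len(rec) != 2 for l in rec]
-- ===== Notes on version B (the rewrite author's own statement) =====
-- stated objective: alternative
-- what changed: Replaces A's single stateful loop with a counter and two output buffers by a two-pass decomposition: first split the lines into delimiter-terminated records, then filter out length-2 records and flatten with a comprehension.
import Mathlib
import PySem

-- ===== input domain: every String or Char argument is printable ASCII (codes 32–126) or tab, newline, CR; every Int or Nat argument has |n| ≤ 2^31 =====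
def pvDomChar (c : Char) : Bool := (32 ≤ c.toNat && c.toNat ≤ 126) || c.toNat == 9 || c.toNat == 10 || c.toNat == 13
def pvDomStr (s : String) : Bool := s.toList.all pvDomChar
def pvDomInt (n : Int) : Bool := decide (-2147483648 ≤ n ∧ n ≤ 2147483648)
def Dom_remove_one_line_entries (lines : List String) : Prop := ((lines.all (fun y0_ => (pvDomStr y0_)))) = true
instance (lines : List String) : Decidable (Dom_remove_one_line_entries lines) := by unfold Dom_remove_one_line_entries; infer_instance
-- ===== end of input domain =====

-- B replaces A's single stateful loop (counter + two buffers) by split-into-records then filter-and-flatten; objective: alternative decomposition.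

-- ===== PORT A =====
def pvDelim : String := "---------------------------------\n"

-- literal transliteration of A's loop: state (curr_count, final_lines, new_lines)
def pvALoop : List String → Int → List String → List String → List String
  | [], _, final_lines, _ => final_lines
  | line :: rest, curr_count, final_lines, new_lines =>
    if line = pvDelim then
      if curr_count = 1 then
        pvALoop rest 0 final_lines []
      else
        pvALoop rest 0 (final_lines ++ (new_lines ++ [line])) []
    else
      pvALoop rest (curr_count + 1) final_lines (new_lines ++ [line])

def remove_one_line_entries (lines : List String) : List String :=
  pvALoop lines 0 [] []

-- ===== PORT B =====
-- pass 1: split into delimiter-terminated records; trailing partial record discarded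
def pvRecords : List String → List String → List (List String)
  | [], _ => []
  | line :: rest, curr =>
    if line = pvDelim then (curr ++ [line]) :: pvRecords rest []
    else pvRecords rest (curr ++ [line])

def remove_one_line_entries_alt (lines : List String) : List String :=
  ((pvRecords lines []).filter (fun rec => rec.length ≠ 2)).flatMap (fun rec => rec)

-- ===== PRECONDITION & SPEC =====
def Spec_remove_one_line_entries (lines : List String) (out : List String) : Prop := out = remove_one_line_entries_alt lines
instance (lines : List String) (out : List String) : Decidable (Spec_remove_one_line_entries lines out) := by unfold Spec_remove_one_line_entries; infer_instance

-- ===== CLAIM (what is proved, stated in full; the proofs are below) =====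
def Claim_equal_remove_one_line_entries : Prop := ∀ (lines : List String), Dom_remove_one_line_entries lines → Spec_remove_one_line_entries lines (remove_one_line_entries lines)

-- ===== LEMMAS AND PROOFS =====
theorem pvLoop_eq (lines : List String) : ∀ (curr final : List String),
    pvALoop lines (curr.length : Int) final curr
      = final ++ ((pvRecords lines curr).filter (fun rec => rec.length ≠ 2)).flatMap (fun rec => rec) := by
  induction lines with
  | nil => intro curr final; simp [pvALoop, pvRecords]
  | cons line rest ih =>
    intro curr final
    by_cases h : line = pvDelim
    · subst h
      by_cases h1 : curr.length = 1
      · simp only [pvALoop, pvRecords, if_true]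
        rw [if_pos (by exact_mod_cast h1 : (curr.length : Int) = 1)]
        rw [List.filter_cons_of_neg (by simp [h1])]
        simpa using ih [] final
      · have hc : ¬ ((curr.length : Int) = 1) := by exact_mod_cast h1
        simp only [pvALoop, pvRecords, if_true]
        rw [if_neg hc]
        rw [List.filter_cons_of_pos (by simp; omega), List.flatMap_cons]
        have hh := ih [] (final ++ (curr ++ [pvDelim]))
        simp only [List.length_nil, Nat.cast_zero] at hh
        rw [hh, List.append_assoc]
    · simp only [pvALoop, pvRecords, if_neg h]
      have hh := ih (curr ++ [line]) final
      rw [show ((curr ++ [line]).length : Int) = (curr.length : Int) + 1 by simp] at hh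
      exact hh

-- ===== VERDICT (by name: the statement is the Claim_ definition above) =====
theorem remove_one_line_entries_spec : Claim_equal_remove_one_line_entries := by
  intro lines _
  unfold Spec_remove_one_line_entries remove_one_line_entries remove_one_line_entries_alt
  simpa using pvLoop_eq lines [] []
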